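-- pv_equiv track=rewrite | github.com/mdziedziniewicz/Ribbed-Rubber | python_script_beta_slantsquare_walk010workjointbuilder6_translation6.py | ChainLink
-- ===== SOURCE A (Python) =====
-- def ChainLink(L,R):
--     #takes two parts of a closed polygon and makes a valid closed polyline out of it - the paths don't overlap
--     path = []
--
--     size = len(L)+len(R)+1
--
--     for i in range(size):
--         path.append(" ")
--
--
--     for i in range(size-1):
--         if (i <= len(L)-1):
--             path[i] = L[i]
--         else:
--             path[i] = R[size-2-i]
--
--     #this line is to make sure that the starting point of the polyline is indeed doubled
--     path[size-1] = L[0]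
--
--     return path
-- ===== SOURCE B (Python) =====
-- def ChainLink(L, R):
--     # Build the closed polyline with a stack: copy L, then pop R's elements
--     # (LIFO order reverses them implicitly), finally close with L's start.
--     out = []
--     for p in L:
--         out.append(p)
--     stack = list(R)
--     while stack:
--         out.append(stack.pop())
--     out.append(L[0])
--     return out
-- ===== Notes on version B (the rewrite author's own statement) =====
-- stated objective: alternative
-- what changed: Replaces A's preallocated placeholder list filled by an indexed loop with a branch (R[size-2-i]) by a stack traversal: copy L, pop a copy of R until empty (LIFO order yields the reversal with no index arithmetic), then append L[0].
import Mathlib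
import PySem

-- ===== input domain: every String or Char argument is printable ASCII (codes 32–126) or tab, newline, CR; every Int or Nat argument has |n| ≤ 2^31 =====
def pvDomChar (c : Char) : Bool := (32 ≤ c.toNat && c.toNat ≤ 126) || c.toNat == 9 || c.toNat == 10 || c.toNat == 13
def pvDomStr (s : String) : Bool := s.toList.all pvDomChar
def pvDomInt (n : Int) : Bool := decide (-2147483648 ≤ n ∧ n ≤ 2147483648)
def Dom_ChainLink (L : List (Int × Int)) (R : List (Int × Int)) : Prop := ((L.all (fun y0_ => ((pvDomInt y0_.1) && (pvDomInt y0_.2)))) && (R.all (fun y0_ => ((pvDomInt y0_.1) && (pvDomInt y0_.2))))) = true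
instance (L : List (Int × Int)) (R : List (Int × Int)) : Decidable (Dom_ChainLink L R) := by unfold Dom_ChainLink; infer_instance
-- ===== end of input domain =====

-- B replaces A's placeholder preallocation and indexed fill loop by a stack
-- traversal: copy L, pop a copy of R until empty, append L[0] (objective: alternative).

-- ===== PORT A =====
-- Python's " " placeholder cannot live in List (Int × Int); we use (0,0) as the
-- placeholder value. Every slot is overwritten before the list is returned
-- (the fill loop covers 0..size-2 and the last line sets size-1), so the
-- placeholder never appears in the output. Indexed reads L[i] / R[size-2-i]
-- are in range for the loop's indices; .getD's default is never used.
def ChainLink (L : List (Int × Int)) (R : List (Int × Int)) : List (Int × Int) :=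
  let size := L.length + R.length + 1
  -- for i in range(size): path.append(" ")
  let path := (List.range size).foldl (fun p _ => p ++ [((0 : Int), (0 : Int))]) []
  -- for i in range(size-1): if i <= len(L)-1: path[i] = L[i] else: path[i] = R[size-2-i]
  let path := (List.range (size - 1)).foldl
    (fun p (i : Nat) =>
      if (i : Int) ≤ (L.length : Int) - 1 then
        p.set i (L.getD i (0, 0))
      else
        p.set i (R.getD (size - 2 - i) (0, 0))) path
  -- path[size-1] = L[0]   (Pre_ excludes L = [], where Python raises IndexError)
  path.set (size - 1) (L.getD 0 (0, 0))

-- ===== PORT B =====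
-- while stack: out.append(stack.pop()) — pop takes the LAST element (getLast),
-- the remaining stack is dropLast; terminates since the stack shrinks.
def chainDrain : List (Int × Int) → List (Int × Int) → List (Int × Int)
  | [], out => out
  | x :: xs, out =>
      chainDrain ((x :: xs).dropLast) (out ++ [(x :: xs).getLast (by simp)])
termination_by s _ => s.length
decreasing_by simp

-- out = list(L); while stack: out.append(stack.pop()); out.append(L[0])
-- (Pre_ excludes L = [], where L[0] raises)
def ChainLink_alt (L : List (Int × Int)) (R : List (Int × Int)) : List (Int × Int) :=
  chainDrain R L ++ [L.getD 0 (0, 0)]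

-- ===== PRECONDITION & SPEC =====
-- Pre_ excludes exactly L = [], where both A and B raise IndexError on L[0].
def Pre_ChainLink (L : List (Int × Int)) (R : List (Int × Int)) : Prop := L ≠ []
instance (L : List (Int × Int)) (R : List (Int × Int)) : Decidable (Pre_ChainLink L R) := by unfold Pre_ChainLink; infer_instance
def pvWitness_ChainLink : (List (Int × Int)) × (List (Int × Int)) := ([(0, 0), (2, 0)], [(2, 1), (0, 1)])
def Spec_ChainLink (L : List (Int × Int)) (R : List (Int × Int)) (out : List (Int × Int)) : Prop := out = ChainLink_alt L R
instance (L : List (Int × Int)) (R : List (Int × Int)) (out : List (Int × Int)) : Decidable (Spec_ChainLink L R out) := by unfold Spec_ChainLink; infer_instance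

-- ===== CLAIM (what is proved, stated in full; the proofs are below) =====
def Claim_equal_ChainLink : Prop := ∀ (L : List (Int × Int)) (R : List (Int × Int)), Dom_ChainLink L R → Pre_ChainLink L R → Spec_ChainLink L R (ChainLink L R)

-- ===== LEMMAS AND PROOFS =====

-- Draining the stack appends its elements in reverse order.
theorem pv_drain_spec : ∀ (n : Nat) (s : List (Int × Int)), s.length = n →
    ∀ out, chainDrain s out = out ++ s.reverse := by
  intro n
  induction n with
  | zero => intro s hs out; rw [List.length_eq_zero_iff.mp hs]; simp [chainDrain]
  | succ n ih =>
      intro s hs out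
      match s with
      | x :: xs =>
          rw [chainDrain]
          rw [ih _ (by simp at hs ⊢; omega)]
          conv_rhs => rw [← List.dropLast_append_getLast (l := x :: xs) (by simp)]
          simp

-- The append loop builds acc ++ replicate n placeholder.
theorem pv_append_loop {α : Type} (c : α) (n : Nat) (acc : List α) :
    (List.range n).foldl (fun p _ => p ++ [c]) acc = acc ++ List.replicate n c := by
  induction n generalizing acc with
  | zero => simp
  | succ n ih =>
      rw [List.range_succ, List.foldl_append]
      simp [ih, List.replicate_succ' ]

-- The fill loop writes g i at slot i for i < n, leaving the tail of p untouched.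
theorem pv_fill_loop {α : Type} (g : Nat → α) :
    ∀ (n : Nat) (p : List α), n ≤ p.length →
      (List.range n).foldl (fun q i => q.set i (g i)) p
        = (List.range n).map g ++ p.drop n := by
  intro n
  induction n with
  | zero => simp
  | succ n ih =>
      intro p hn
      rw [List.range_succ, List.foldl_append]
      simp only [List.foldl_cons, List.foldl_nil]
      rw [ih p (Nat.le_of_succ_le hn)]
      have hlen : ((List.range n).map g).length = n := by simp
      have hdrop : p.drop n = p[n] :: p.drop (n + 1) :=
        (List.drop_eq_getElem_cons (by omega)).trans (by simp)
      rw [hdrop, List.set_append, if_neg (by omega), hlen, Nat.sub_self,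
        List.set_cons_zero]
      simp

-- The filled prefix is exactly L ++ R.reverse.
theorem pv_map_g (L R : List (Int × Int)) :
    (List.range (L.length + R.length)).map
        (fun (i : Nat) => if (i : Int) ≤ (L.length : Int) - 1 then L.getD i (0, 0)
                  else R.getD (L.length + R.length + 1 - 2 - i) (0, 0))
      = L ++ R.reverse := by
  apply List.ext_getElem
  · simp
  · intro i h1 h2
    simp only [List.getElem_map, List.getElem_range]
    by_cases hi : i < L.length
    · rw [if_pos (by omega)]
      rw [List.getElem_append_left hi]
      exact List.getD_eq_getElem L _ hi
    · rw [if_neg (by omega)]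
      rw [List.getElem_append_right (by omega)]
      rw [List.getElem_reverse]
      have hlen : i < L.length + R.length := by simpa using h1
      have : L.length + R.length + 1 - 2 - i = R.length - 1 - (i - L.length) := by omega
      rw [this]
      exact List.getD_eq_getElem R _ (by omega)

theorem ChainLink_eq (L R : List (Int × Int)) :
    ChainLink L R = ChainLink_alt L R := by
  unfold ChainLink ChainLink_alt
  rw [pv_drain_spec R.length R rfl L]
  simp only []
  rw [pv_append_loop]
  have hfun : (fun (p : List (Int × Int)) (i : Nat) =>
      if (i : Int) ≤ (L.length : Int) - 1 then p.set i (L.getD i (0, 0))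
      else p.set i (R.getD (L.length + R.length + 1 - 2 - i) (0, 0)))
    = fun (p : List (Int × Int)) (i : Nat) => p.set i
        ((fun (i : Nat) => if (i : Int) ≤ (L.length : Int) - 1 then L.getD i (0, 0)
          else R.getD (L.length + R.length + 1 - 2 - i) (0, 0)) i) := by
    funext p i
    by_cases h : (i : Int) ≤ (L.length : Int) - 1 <;> simp [h]
  rw [hfun, pv_fill_loop _ _ _ (by simp)]
  rw [show L.length + R.length + 1 - 1 = L.length + R.length from by omega]
  rw [pv_map_g]
  have hdrop : ([] ++ List.replicate (L.length + R.length + 1) ((0 : Int), (0 : Int))).drop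
      (L.length + R.length) = [(0, 0)] := by
    simp [List.drop_replicate]
  rw [hdrop]
  have hlen : (L ++ R.reverse).length = L.length + R.length := by simp
  rw [List.set_append, if_neg (by omega)]
  simp [hlen]

-- ===== VERDICT (by name: the statement is the Claim_ definition above) =====
theorem ChainLink_spec : Claim_equal_ChainLink := by
  intro L R _ _
  exact ChainLink_eq L R
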